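-- pv_equiv track=rewrite | github.com/peshal-hash/activepieces | src/api/shhconnect_routes.py | _mask_conn_str
-- ===== SOURCE A (Python) =====
-- def _mask_conn_str(conn_str: str) -> str:
--     parts = []
--     for part in conn_str.split(";"):
--         if part.upper().startswith("PWD="):
--             parts.append("PWD=***")
--         else:
--             parts.append(part)
--     return ";".join(parts)
-- ===== SOURCE B (Python) =====
-- def _mask_conn_str(conn_str: str) -> str:
--     # Single left-to-right scan over characters: at each segment start, check the
--     # next four characters for "PWD=" (case-insensitively) and either emit the
--     # mask and skip the rest of the segment, or copy characters up to the next separator.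
--     out = []
--     i, n = 0, len(conn_str)
--     while True:
--         if conn_str[i:i + 4].upper() == "PWD=":
--             out.append("PWD=***")
--             i += 4
--             while i < n and conn_str[i] != ';':
--                 i += 1
--         else:
--             while i < n and conn_str[i] != ';':
--                 out.append(conn_str[i])
--                 i += 1
--         if i >= n:
--             break
--         out.append(';')
--         i += 1
--     return ''.join(out)
-- ===== Notes on version B (the rewrite author's own statement) =====
-- stated objective: alternative
-- what changed: Replaces split-into-parts / per-part masking / join with a single left-to-right character scan that checks the four characters at each segment start and either emits the mask and skips the rest of the segment or copies characters through, never materialising the list of segments.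
import Mathlib
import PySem

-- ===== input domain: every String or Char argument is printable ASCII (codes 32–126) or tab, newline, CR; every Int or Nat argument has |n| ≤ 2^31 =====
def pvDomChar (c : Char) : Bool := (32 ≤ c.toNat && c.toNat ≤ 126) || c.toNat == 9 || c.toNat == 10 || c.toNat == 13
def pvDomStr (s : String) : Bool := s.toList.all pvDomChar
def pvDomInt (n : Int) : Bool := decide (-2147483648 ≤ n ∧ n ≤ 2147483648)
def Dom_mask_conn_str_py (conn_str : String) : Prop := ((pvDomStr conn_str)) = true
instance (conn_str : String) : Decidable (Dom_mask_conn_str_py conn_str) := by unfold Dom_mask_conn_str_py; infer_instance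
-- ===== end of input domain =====

-- B replaces A's split-into-parts / mask-each-part / re-join with a single character scan
-- over the string; same O(n) cost, no intermediate list of parts.

-- ===== PORT A =====
-- A: split on ";", append the mask for parts whose upper() starts with "PWD=", re-join.
def mask_conn_str_py (conn_str : String) : String :=
  let parts := ((PySem.Str.split? conn_str ";").getD []).foldl
    (fun acc part =>
      if PySem.Str.startswith (PySem.Str.upper part) "PWD=" then acc ++ ["PWD=***"]
      else acc ++ [part]) []
  PySem.Str.join ";" parts

-- ===== PORT B =====
-- B's segment-start test: the next four characters, uppercased, against "PWD=".
def pvPwdHead (cs : List Char) : Bool := PySem.Chars.upper (cs.take 4) == ['P', 'W', 'D', '=']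

-- B's outer while-loop: one iteration per segment; the inner while-loops that skip / copy
-- characters up to the next semicolon are dropWhile / takeWhile, `tail` consumes the separator.
def pvMaskScan (cs : List Char) : List Char :=
  if pvPwdHead cs then
    if h : (cs.drop 4).dropWhile (· ≠ ';') = [] then "PWD=***".toList
    else "PWD=***".toList ++ ';' :: pvMaskScan ((cs.drop 4).dropWhile (· ≠ ';')).tail
  else
    if h : cs.dropWhile (· ≠ ';') = [] then cs.takeWhile (· ≠ ';')
    else cs.takeWhile (· ≠ ';') ++ ';' :: pvMaskScan (cs.dropWhile (· ≠ ';')).tail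
termination_by cs.length
decreasing_by
  · have h1 : (List.dropWhile (fun x => !decide (x = ';')) (cs.drop 4)).length ≤ (cs.drop 4).length :=
      List.length_dropWhile_le _ _
    have h2 : (List.dropWhile (fun x => !decide (x = ';')) (cs.drop 4)).length ≠ 0 := by
      intro e
      exact h (by simpa [decide_not] using List.eq_nil_of_length_eq_zero e)
    have h3 : (cs.drop 4).length ≤ cs.length := by simp
    simp [List.length_tail]
    omega
  · have h1 : (List.dropWhile (fun x => !decide (x = ';')) cs).length ≤ cs.length :=
      List.length_dropWhile_le _ _
    have h2 : (List.dropWhile (fun x => !decide (x = ';')) cs).length ≠ 0 := by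
      intro e
      exact h (by simpa [decide_not] using List.eq_nil_of_length_eq_zero e)
    simp [List.length_tail]
    omega

def mask_conn_str_py_alt (conn_str : String) : String :=
  String.ofList (pvMaskScan conn_str.toList)

-- ===== PRECONDITION & SPEC =====
def Spec_mask_conn_str_py (conn_str : String) (out : String) : Prop := out = mask_conn_str_py_alt conn_str
instance (conn_str : String) (out : String) : Decidable (Spec_mask_conn_str_py conn_str out) := by unfold Spec_mask_conn_str_py; infer_instance

-- ===== CLAIM (what is proved, stated in full; the proofs are below) =====
def Claim_equal_mask_conn_str_py : Prop := ∀ (conn_str : String), Dom_mask_conn_str_py conn_str → Spec_mask_conn_str_py conn_str (mask_conn_str_py conn_str)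

-- ===== LEMMAS AND PROOFS =====

-- A's per-part masking, moved to the character-list side.
def pvMaskPart (p : List Char) : List Char :=
  if PySem.Chars.startswith (PySem.Chars.upper p) ['P', 'W', 'D', '='] then "PWD=***".toList else p

-- Reference shape of splitting at semicolons: first segment, then the rest after the first one.
def pvSplitSemi (cs : List Char) : List (List Char) :=
  cs.takeWhile (· ≠ ';') ::
    (if h : cs.dropWhile (· ≠ ';') = [] then []
     else pvSplitSemi (cs.dropWhile (· ≠ ';')).tail)
termination_by cs.length
decreasing_by
  have h1 : (List.dropWhile (fun x => !decide (x = ';')) cs).length ≤ cs.length :=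
    List.length_dropWhile_le _ cs
  have h2 : (List.dropWhile (fun x => !decide (x = ';')) cs).length ≠ 0 := by
    intro e
    exact h (by simpa [decide_not] using List.eq_nil_of_length_eq_zero e)
  simp [List.length_tail]
  omega

lemma pvSplitSemi_cons_semi (rest : List Char) :
    pvSplitSemi (';' :: rest) = [] :: pvSplitSemi rest := by
  rw [pvSplitSemi.eq_def]
  simp

lemma pvSplitSemi_cons_ne (c : Char) (rest : List Char) (hc : c ≠ ';') :
    pvSplitSemi (c :: rest) = (pvSplitSemi rest).modifyHead (c :: ·) := by
  rw [pvSplitSemi.eq_def]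
  conv_rhs => rw [pvSplitSemi.eq_def]
  simp only [List.takeWhile_cons, List.dropWhile_cons, hc, decide_not, decide_eq_true_eq,
    if_true, if_false]
  simp [hc]

lemma pvSplitOn_go_spec (fuel : Nat) : ∀ (l cur : List Char) (acc : List (List Char)),
    l.length < fuel →
    PySem.Chars.splitOn.go [';'] fuel l cur acc =
      acc.reverse ++ (pvSplitSemi l).modifyHead (cur.reverse ++ ·) := by
  induction fuel with
  | zero => intro l cur acc h; omega
  | succ fuel ih =>
    intro l cur acc h
    cases l with
    | nil =>
      rw [PySem.Chars.splitOn.go]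
      · rw [pvSplitSemi.eq_def]
        simp
      · omega
    | cons c rest =>
      rw [PySem.Chars.splitOn.go]
      by_cases hc : c = ';'
      · subst hc
        have hpre : [';'].isPrefixOf (';' :: rest) = true := by simp [List.isPrefixOf]
        simp only [hpre, if_true, List.length_cons, List.length_nil, Nat.zero_add,
          List.drop_succ_cons, List.drop_zero]
        rw [ih rest [] ((cur.reverse :: acc)) (by simp at h ⊢; omega)]
        rw [pvSplitSemi_cons_semi]
        cases pvSplitSemi rest <;> simp
      · have hpre : [';'].isPrefixOf (c :: rest) = false := by
          simp [List.isPrefixOf]; exact fun e => absurd e.symm hc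
        simp only [hpre, Bool.false_eq_true, if_false]
        rw [ih rest (c :: cur) acc (by simp at h ⊢; omega)]
        rw [pvSplitSemi_cons_ne c rest hc]
        cases pvSplitSemi rest <;> simp [List.modifyHead]

lemma pvSplitOn_eq (cs : List Char) :
    PySem.Chars.splitOn cs [';'] = pvSplitSemi cs := by
  rw [PySem.Chars.splitOn, pvSplitOn_go_spec (cs.length + 1) cs [] [] (by omega)]
  cases pvSplitSemi cs <;> simp [List.modifyHead]

-- the segment-start test of B equals A's per-part test on the first segment
lemma pvStartsAux (pat : List Char) (hpat : ';' ∉ pat) : ∀ (cs : List Char),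
    (PySem.Chars.upper (cs.take pat.length) == pat) =
      PySem.Chars.startswith (PySem.Chars.upper (cs.takeWhile (· ≠ ';'))) pat := by
  induction pat with
  | nil => intro cs; simp [PySem.Chars.upper, PySem.Chars.startswith]
  | cons p pr ih =>
    intro cs
    cases cs with
    | nil => simp [PySem.Chars.upper, PySem.Chars.startswith]
    | cons c t =>
      by_cases hc : c = ';'
      · subst hc
        have hup : PySem.Chars.upperChar ';' = ';' := by decide
        have hp : p ≠ ';' := by intro h; exact hpat (by simp [h])
        simp [PySem.Chars.upper, PySem.Chars.startswith, List.takeWhile, hup,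
          (by simpa [eq_comm] using hp : ¬ (';' = p))]
      · have hpr : ';' ∉ pr := fun h => hpat (by simp [h])
        have := ih hpr t
        simp [PySem.Chars.upper, PySem.Chars.startswith, List.takeWhile, List.isPrefixOf, hc] at this ⊢
        cases hb : (PySem.Chars.upperChar c == p) with
        | false =>
          simp only [hb, Bool.false_and]
          simp [this]
          intro h
          simp [h] at hb
        | true =>
          simp only [hb, Bool.true_and]
          simp [this]
          intro _
          have hb' : PySem.Chars.upperChar c = p := by simpa using hb
          exact hb'.symm

lemma pvPwdHead_eq (cs : List Char) :
    pvPwdHead cs =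
      PySem.Chars.startswith (PySem.Chars.upper (cs.takeWhile (· ≠ ';'))) ['P', 'W', 'D', '='] := by
  have := pvStartsAux ['P', 'W', 'D', '='] (by decide) cs
  simpa [pvPwdHead] using this

-- when the test fires, none of the first four characters is a separator, so the skip may start at drop 4
lemma pvPwdHead_dropWhile (cs : List Char) (h : pvPwdHead cs = true) :
    cs.dropWhile (· ≠ ';') = (cs.drop 4).dropWhile (· ≠ ';') := by
  match cs with
  | [] => simp [pvPwdHead, PySem.Chars.upper] at h
  | [a] => simp [pvPwdHead, PySem.Chars.upper] at h
  | [a, b] => simp [pvPwdHead, PySem.Chars.upper] at h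
  | [a, b, c] => simp [pvPwdHead, PySem.Chars.upper] at h
  | a :: b :: c :: d :: r =>
    simp [pvPwdHead, PySem.Chars.upper] at h
    obtain ⟨ha, hb, hc, hd⟩ := h
    have na : a ≠ ';' := by intro e; rw [e] at ha; exact absurd ha (by decide)
    have nb : b ≠ ';' := by intro e; rw [e] at hb; exact absurd hb (by decide)
    have nc : c ≠ ';' := by intro e; rw [e] at hc; exact absurd hc (by decide)
    have nd : d ≠ ';' := by intro e; rw [e] at hd; exact absurd hd (by decide)
    simp [List.dropWhile, na, nb, nc, nd]

-- main correspondence: A's join over masked parts = B's single scan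
lemma pvJoin_mask_eq_scan (n : Nat) : ∀ (cs : List Char), cs.length ≤ n →
    PySem.Chars.join [';'] ((pvSplitSemi cs).map pvMaskPart) = pvMaskScan cs := by
  induction n with
  | zero =>
    intro cs h
    have : cs = [] := List.eq_nil_of_length_eq_zero (by omega)
    subst this
    rw [pvSplitSemi.eq_def, pvMaskScan.eq_def]
    simp [pvMaskPart, pvPwdHead, PySem.Chars.upper, PySem.Chars.startswith,
      PySem.Chars.join_singleton]
  | succ n ih =>
    intro cs h
    rw [pvSplitSemi.eq_def, pvMaskScan.eq_def]
    simp only [decide_not]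
    have hmp : pvMaskPart (cs.takeWhile (fun x => !decide (x = ';'))) =
        if pvPwdHead cs then "PWD=***".toList else cs.takeWhile (fun x => !decide (x = ';')) := by
      have := pvPwdHead_eq cs
      simp only [decide_not] at this
      rw [pvMaskPart, this]
    by_cases hp : pvPwdHead cs
    · rw [if_pos hp]
      have hdw := pvPwdHead_dropWhile cs hp
      simp only [decide_not] at hdw
      rw [← hdw]
      by_cases h0 : List.dropWhile (fun x => !decide (x = ';')) cs = []
      · rw [dif_pos h0, dif_pos h0]
        simp [PySem.Chars.join_singleton, hmp, hp]
      · rw [dif_neg h0, dif_neg h0]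
        have hlen : ((List.dropWhile (fun x => !decide (x = ';')) cs).tail).length ≤ n := by
          have h1 : (List.dropWhile (fun x => !decide (x = ';')) cs).length ≤ cs.length :=
            List.length_dropWhile_le _ cs
          have h2 : (List.dropWhile (fun x => !decide (x = ';')) cs).length ≠ 0 :=
            fun e => h0 (List.eq_nil_of_length_eq_zero e)
          simp [List.length_tail]
          omega
        have hih := ih _ hlen
        simp only [decide_not] at hih
        rw [← hih]
        obtain ⟨q, qs, hq⟩ : ∃ q qs, pvSplitSemi ((List.dropWhile (fun x => !decide (x = ';')) cs).tail) = q :: qs := by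
          rw [pvSplitSemi.eq_def]; exact ⟨_, _, rfl⟩
        rw [hq]
        simp only [List.map_cons, PySem.Chars.join_cons_cons]
        rw [← List.map_cons, ← hq]
        simp [hmp, hp]
    · rw [if_neg hp]
      by_cases h0 : List.dropWhile (fun x => !decide (x = ';')) cs = []
      · rw [dif_pos h0, dif_pos h0]
        simp [PySem.Chars.join_singleton, hmp, hp]
      · rw [dif_neg h0, dif_neg h0]
        have hlen : ((List.dropWhile (fun x => !decide (x = ';')) cs).tail).length ≤ n := by
          have h1 : (List.dropWhile (fun x => !decide (x = ';')) cs).length ≤ cs.length :=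
            List.length_dropWhile_le _ cs
          have h2 : (List.dropWhile (fun x => !decide (x = ';')) cs).length ≠ 0 :=
            fun e => h0 (List.eq_nil_of_length_eq_zero e)
          simp [List.length_tail]
          omega
        have hih := ih _ hlen
        simp only [decide_not] at hih
        rw [← hih]
        obtain ⟨q, qs, hq⟩ : ∃ q qs, pvSplitSemi ((List.dropWhile (fun x => !decide (x = ';')) cs).tail) = q :: qs := by
          rw [pvSplitSemi.eq_def]; exact ⟨_, _, rfl⟩
        rw [hq]
        simp only [List.map_cons, PySem.Chars.join_cons_cons]
        rw [← List.map_cons, ← hq]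
        simp [hmp, hp]

-- A's fold appends one element per part: it is a map
lemma pvFold_eq_map (l : List String) (acc : List String) :
    l.foldl
      (fun acc part =>
        if PySem.Str.startswith (PySem.Str.upper part) "PWD=" then acc ++ ["PWD=***"]
        else acc ++ [part]) acc
    = acc ++ l.map
        (fun part => if PySem.Str.startswith (PySem.Str.upper part) "PWD=" then "PWD=***" else part) := by
  induction l generalizing acc with
  | nil => simp
  | cons p t ih =>
    simp only [List.foldl_cons, List.map_cons]
    rw [ih]
    by_cases hp : PySem.Str.startswith (PySem.Str.upper p) "PWD=" = true
    · simp only [if_pos hp]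
      simp
    · simp only [if_neg hp]
      simp

-- ===== VERDICT (by name: the statement is the Claim_ definition above) =====
theorem mask_conn_str_py_spec : Claim_equal_mask_conn_str_py := by
  intro s _
  show mask_conn_str_py s = mask_conn_str_py_alt s
  have hsplit : PySem.Str.split? s ";" = some ((PySem.Chars.splitOn s.toList [';']).map String.ofList) := by
    simp [PySem.Str.split?, PySem.Chars.split?]
  have htl : (mask_conn_str_py s).toList = (mask_conn_str_py_alt s).toList := by
    rw [mask_conn_str_py]
    simp only [hsplit, Option.getD_some]
    rw [pvFold_eq_map]
    rw [PySem.Str.toList_join]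
    simp only [List.nil_append, List.map_map]
    have hmap : ((PySem.Chars.splitOn s.toList [';']).map
        (String.toList ∘ ((fun part => if PySem.Str.startswith (PySem.Str.upper part) "PWD=" then "PWD=***" else part) ∘ String.ofList)))
        = (PySem.Chars.splitOn s.toList [';']).map pvMaskPart := by
      apply List.map_congr_left
      intro p _
      simp only [Function.comp]
      by_cases hc : PySem.Chars.startswith (PySem.Chars.upper p) ['P', 'W', 'D', '=']
      · rw [if_pos, pvMaskPart, if_pos hc]
        rw [PySem.Str.startswith_eq, PySem.Str.toList_upper, String.toList_ofList]
        simpa using hc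
      · rw [if_neg, pvMaskPart, if_neg hc, String.toList_ofList]
        rw [PySem.Str.startswith_eq, PySem.Str.toList_upper, String.toList_ofList]
        simpa using hc
    rw [hmap, pvSplitOn_eq]
    have hsep : (";" : String).toList = [';'] := by decide
    rw [hsep, pvJoin_mask_eq_scan s.toList.length s.toList (le_refl _)]
    rw [mask_conn_str_py_alt, String.toList_ofList]
  calc mask_conn_str_py s = String.ofList (mask_conn_str_py s).toList := by rw [String.ofList_toList]
    _ = String.ofList (mask_conn_str_py_alt s).toList := by rw [htl]
    _ = mask_conn_str_py_alt s := by rw [String.ofList_toList]
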